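-- pv_equiv track=rewrite | github.com/s-surineni/atice | leet_code/jump_game_vi.py | find_max_score
-- ===== SOURCE A (Python) =====
-- from collections import deque
--
-- def find_max_score(nums, wdow_len):
--     num_count = len(nums)
--     dp_cache = [None] * num_count
--     dp_cache[-1] = nums[-1]
--     window = deque()
--     window.append(num_count - 1)
--
--     for trk in range(num_count - 2, -1, -1):
--         # while window and len(window) > wdow_len:
--         #     window.popleft()
--
--         if window[0] - trk > wdow_len:
--             window.popleft()
--
--         dp_cache[trk] = dp_cache[window[0]] + nums[trk]
--
--         while window and dp_cache[window[-1]] <= dp_cache[trk]: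
--             window.pop()
--         window.append(trk)
--
--     return dp_cache[0]
-- ===== SOURCE B (Python) =====
-- def find_max_score(nums, wdow_len):
--     # Same right-to-left DP, but no deque: take max over the dp window slice directly.
--     n = len(nums)
--     dp = [None] * n
--     dp[-1] = nums[-1]
--     for i in range(n - 2, -1, -1):
--         dp[i] = nums[i] + max(dp[i + 1 : i + 1 + wdow_len])
--     return dp[0]
-- ===== Notes on version B (the rewrite author's own statement) =====
-- stated objective: simpler
-- what changed: The monotonic-deque maintenance is removed entirely: B keeps the same right-to-left DP but computes dp[i] = nums[i] + max(dp[i+1:i+1+wdow_len]) by a direct max over the window slice.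
import Mathlib
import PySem

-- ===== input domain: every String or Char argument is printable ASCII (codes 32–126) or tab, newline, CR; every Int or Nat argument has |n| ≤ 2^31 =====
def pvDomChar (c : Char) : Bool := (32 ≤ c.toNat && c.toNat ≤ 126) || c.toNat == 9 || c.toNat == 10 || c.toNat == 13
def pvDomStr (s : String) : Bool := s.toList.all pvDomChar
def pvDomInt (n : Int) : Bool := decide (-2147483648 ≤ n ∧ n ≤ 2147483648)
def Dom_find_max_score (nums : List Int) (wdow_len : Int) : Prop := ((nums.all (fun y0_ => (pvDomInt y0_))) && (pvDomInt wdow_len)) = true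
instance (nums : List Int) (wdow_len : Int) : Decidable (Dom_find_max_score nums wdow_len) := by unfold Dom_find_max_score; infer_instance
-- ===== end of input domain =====

-- B removes A's monotonic deque and computes each dp entry as a direct max over the dp window slice
-- (same right-to-left DP, different data structure; equivalence of return values is proved on Pre_).

-- ===== PORT A =====

-- dp_cache[j] read as an int (entries are None/int, i.e. Option Int; .getD 0 is the
-- out-of-domain default for reads Python would make on filled entries only)
def pvDAt (dp : List (Option Int)) (j : Int) : Int := (dp.getD j.toNat none).getD 0

-- 'while window and dp_cache[window[-1]] <= v: window.pop()' — pops from the back,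
-- rendered as dropWhile on the reversed deque
def pvPopLe (dp : List (Option Int)) (v : Int) (win : List Int) : List Int :=
  (win.reverse.dropWhile (fun j => decide (pvDAt dp j ≤ v))).reverse

-- one iteration of A's for-loop (state = (dp_cache, window), front of deque = head)
def pvStepA (nums : List Int) (wdow_len : Int) (st : List (Option Int) × List Int)
    (trk : Int) : List (Option Int) × List Int :=
  let dp := st.1
  let window := if st.2.headD 0 - trk > wdow_len then st.2.tail else st.2   -- window[0], popleft
  let v := pvDAt dp (window.headD 0) + PySem.List.pyGetD nums trk 0         -- dp_cache[window[0]] + nums[trk]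
  let dp := dp.set trk.toNat (some v)                                       -- dp_cache[trk] = v
  (dp, pvPopLe dp v window ++ [trk])                                        -- while …: pop; append trk

def find_max_score (nums : List Int) (wdow_len : Int) : Int :=
  let num_count : Int := nums.length
  let dp_cache : List (Option Int) := List.replicate nums.length none
  let dp_cache := dp_cache.set (nums.length - 1) (PySem.List.pyGet? nums (-1))  -- dp_cache[-1] = nums[-1]
  let st := (PySem.List.pyRange (num_count - 2) (-1) (-1)).foldl
              (pvStepA nums wdow_len) (dp_cache, [num_count - 1])
  pvDAt st.1 0                                                              -- return dp_cache[0]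

-- ===== PORT B =====

-- one iteration of B's loop: dp[i] = nums[i] + max(dp[i+1 : i+1+wdow_len])
def pvStepB (nums : List Int) (wdow_len : Int) (dp : List (Option Int)) (i : Int) :
    List (Option Int) :=
  let m := (PySem.List.max?
              ((PySem.List.slice dp (some (i + 1)) (some (i + 1 + wdow_len))).map
                (fun o => o.getD 0)) (fun x => x)).getD 0
  dp.set i.toNat (some (PySem.List.pyGetD nums i 0 + m))

def find_max_score_alt (nums : List Int) (wdow_len : Int) : Int :=
  let n : Int := nums.length
  let dp : List (Option Int) := List.replicate nums.length none
  let dp := dp.set (nums.length - 1) (PySem.List.pyGet? nums (-1))          -- dp[-1] = nums[-1]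
  let dp := (PySem.List.pyRange (n - 2) (-1) (-1)).foldl (pvStepB nums wdow_len) dp
  pvDAt dp 0                                                               -- return dp[0]

-- ===== PRECONDITION & SPEC =====
-- Pre_ excludes exactly the inputs on which A raises: the empty list (IndexError on nums[-1]),
-- and wdow_len < 1 with at least two elements (the deque empties, IndexError on window[0]).
def Pre_find_max_score (nums : List Int) (wdow_len : Int) : Prop :=
  nums ≠ [] ∧ (nums.length = 1 ∨ 1 ≤ wdow_len)
instance (nums : List Int) (wdow_len : Int) : Decidable (Pre_find_max_score nums wdow_len) := by
  unfold Pre_find_max_score; infer_instance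

def pvWitness_find_max_score : List Int × Int := ([3, -1, 2], 2)

def Spec_find_max_score (nums : List Int) (wdow_len : Int) (out : Int) : Prop := out = find_max_score_alt nums wdow_len
instance (nums : List Int) (wdow_len : Int) (out : Int) : Decidable (Spec_find_max_score nums wdow_len out) := by unfold Spec_find_max_score; infer_instance

-- ===== CLAIM (what is proved, stated in full; the proofs are below) =====
def Claim_equal_find_max_score : Prop := ∀ (nums : List Int) (wdow_len : Int), Dom_find_max_score nums wdow_len → Pre_find_max_score nums wdow_len → Spec_find_max_score nums wdow_len (find_max_score nums wdow_len)

-- ===== LEMMAS AND PROOFS =====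

-- The loop invariant: before processing index t, with dp the (common) dp_cache and W A's deque
-- (head = front): W holds strictly decreasing indices of [t+1, nums.length-1] within t+1+w of t+1,
-- ends (back) at t+1, dp values strictly decrease along it, and every in-window index not in W is
-- dominated by a smaller index in W.
structure pvInv (nums : List Int) (w t : Int) (dp : List (Option Int)) (W : List Int) : Prop where
  hlen : dp.length = nums.length
  hne : W ≠ []
  hlast : W.getLast? = some (t + 1)
  hmem : ∀ j ∈ W, t + 1 ≤ j ∧ j ≤ (nums.length : Int) - 1 ∧ j ≤ t + 1 + w
  hsort : W.Pairwise (fun x y => y < x ∧ pvDAt dp y < pvDAt dp x)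
  hcov : ∀ j : Int, t + 1 ≤ j → j ≤ t + 1 + w → j ≤ (nums.length : Int) - 1 → j ∉ W →
          ∃ i ∈ W, i < j ∧ pvDAt dp j ≤ pvDAt dp i

lemma pvDAt_set_ne (dp : List (Option Int)) (x : Option Int) (t j : Int)
    (h0 : 0 ≤ t) (_h1 : 0 ≤ j) (hne : j ≠ t) :
    pvDAt (dp.set t.toNat x) j = pvDAt dp j := by
  unfold pvDAt
  have : j.toNat ≠ t.toNat := by omega
  rw [List.getD_eq_getElem?_getD, List.getD_eq_getElem?_getD,
    List.getElem?_set_ne (by omega)]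

lemma pvDAt_set_self (dp : List (Option Int)) (v : Int) (t : Int)
    (h0 : 0 ≤ t) (hlt : t.toNat < dp.length) :
    pvDAt (dp.set t.toNat (some v)) t = v := by
  unfold pvDAt
  rw [List.getD_eq_getElem?_getD, List.getElem?_set_self hlt]
  rfl

-- generic characterization of pop-from-back: on a list where q propagates forward,
-- dropping q-elements from the back is takeWhile (¬q)
lemma pvPop_takeWhile {α : Type} (q : α → Bool) :
    ∀ (l : List α), l.Pairwise (fun x y => q x = true → q y = true) →
    (l.reverse.dropWhile q).reverse = l.takeWhile (fun a => ! q a) := by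
  intro l
  induction l with
  | nil => intro _; rfl
  | cons x tl ih =>
    intro hp
    have hp' := (List.pairwise_cons.mp hp).2
    have hx := (List.pairwise_cons.mp hp).1
    by_cases hq : q x = true
    · have hall : ∀ a ∈ (x :: tl).reverse, q a = true := by
        intro a ha
        rcases List.mem_cons.mp (List.mem_reverse.mp ha) with rfl | h
        · exact hq
        · exact hx a h hq
        
      rw [List.dropWhile_eq_nil_iff.mpr hall]
      simp [hq]
    · have hq' : q x = false := by simpa using hq
      simp only [List.reverse_cons]
      rw [List.dropWhile_append]
      by_cases hnil : (tl.reverse.dropWhile q).isEmpty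
      · have htl : (tl.reverse.dropWhile q).reverse = tl.takeWhile (fun a => ! q a) := ih hp'
        have : tl.takeWhile (fun a => ! q a) = [] := by
          rw [← htl]
          simp [List.isEmpty_iff.mp hnil]
        simp [hnil, hq', this]
      · simp only [hnil, Bool.false_eq_true, if_false]
        rw [List.reverse_append]
        simp [hq', ih hp']

-- elements thrown away by pop-from-back satisfy q
lemma pvPop_dropped {α : Type} (q : α → Bool) :
    ∀ (l : List α), l.Pairwise (fun x y => q x = true → q y = true) →
    ∀ x ∈ l, x ∉ l.takeWhile (fun a => ! q a) → q x = true := by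
  intro l
  induction l with
  | nil => intro _ x hx; simp at hx
  | cons a tl ih =>
    intro hp x hx hnx
    have hp' := (List.pairwise_cons.mp hp).2
    have ha := (List.pairwise_cons.mp hp).1
    by_cases hq : q a = true
    · rcases List.mem_cons.mp hx with rfl | hxt
      · exact hq
      · exact ha x hxt hq
    · have hq' : q a = false := by simpa using hq
      rw [List.takeWhile_cons] at hnx
      simp only [hq', Bool.not_false, if_true] at hnx
      rcases List.mem_cons.mp hx with rfl | hxt
      · exact absurd (List.mem_cons_self) hnx
      · exact ih hp' x hxt (fun h => hnx (List.mem_cons_of_mem _ h))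

-- head of a pairwise (< , dp <) deque dominates every member
lemma pvHead_dom (dp : List (Option Int)) (F : Int) (tl : List Int)
    (hs : (F :: tl).Pairwise (fun x y => y < x ∧ pvDAt dp y < pvDAt dp x)) :
    ∀ j ∈ F :: tl, pvDAt dp j ≤ pvDAt dp F ∧ j ≤ F := by
  intro j hj
  rcases List.mem_cons.mp hj with rfl | hjt
  · exact ⟨le_refl _, le_refl _⟩
  · have := (List.pairwise_cons.mp hs).1 j hjt
    exact ⟨le_of_lt this.2, le_of_lt this.1⟩

-- The window after the front pop: all its facts, for the step lemma.
-- W1 is the deque A actually indexes with window[0].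
lemma pvAfterPop (nums : List Int) (w t : Int) (dp : List (Option Int)) (W : List Int)
    (hw : 1 ≤ w) (h0 : 0 ≤ t) (h2 : t ≤ (nums.length : Int) - 2)
    (inv : pvInv nums w t dp W) :
    let W1 := if W.headD 0 - t > w then W.tail else W
    W1 ≠ [] ∧ W1.getLast? = some (t + 1) ∧
    (∀ j ∈ W1, t + 1 ≤ j ∧ j ≤ (nums.length : Int) - 1 ∧ j ≤ t + w) ∧
    W1.Pairwise (fun x y => y < x ∧ pvDAt dp y < pvDAt dp x) ∧
    (∀ j : Int, t + 1 ≤ j → j ≤ t + w → j ≤ (nums.length : Int) - 1 → j ∉ W1 →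
      ∃ i ∈ W1, i < j ∧ pvDAt dp j ≤ pvDAt dp i) := by
  intro W1
  obtain ⟨F, tl, rfl⟩ : ∃ F tl, W = F :: tl := by
    cases W with
    | nil => exact absurd rfl inv.hne
    | cons a l => exact ⟨a, l, rfl⟩
  have hF := inv.hmem F List.mem_cons_self
  have hdom := pvHead_dom dp F tl inv.hsort
  by_cases hc : F - t > w
  · -- popleft: F = t+1+w leaves; tl is nonempty since last = t+1 < F
    have hFeq : F = t + 1 + w := by
      simp only at hc; omega
    have htl : tl ≠ [] := by
      intro h
      subst h
      have : F = t + 1 := by simpa using inv.hlast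
      omega
    have hW1 : W1 = tl := by
      simp only [W1, List.headD_cons, List.tail_cons, if_pos hc]
    rw [hW1]
    refine ⟨htl, ?_, ?_, (List.pairwise_cons.mp inv.hsort).2, ?_⟩
    · cases tl with
      | nil => exact absurd rfl htl
      | cons b l =>
        have := inv.hlast
        rwa [List.getLast?_cons_cons] at this
    · intro j hj
      have hm := inv.hmem j (List.mem_cons_of_mem _ hj)
      have hlt := (List.pairwise_cons.mp inv.hsort).1 j hj
      exact ⟨hm.1, hm.2.1, by omega⟩
    · intro j hj1 hj2 hj3 hjn
      have hjW : j ∉ F :: tl := by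
        intro h
        rcases List.mem_cons.mp h with rfl | h'
        · omega
        · exact hjn h'
      obtain ⟨i, hi, hlt, hle⟩ := inv.hcov j hj1 (by omega) hj3 hjW
      rcases List.mem_cons.mp hi with rfl | hi'
      · omega
      · exact ⟨i, hi', hlt, hle⟩
  · -- no pop
    have hW1 : W1 = F :: tl := by
      simp only [W1, List.headD_cons, if_neg hc]
    have hFle : F ≤ t + w := by
      simp only at hc; omega
    rw [hW1]
    refine ⟨by simp, inv.hlast, ?_, inv.hsort, ?_⟩
    · intro j hj
      have hm := inv.hmem j hj
      have := (pvHead_dom dp F tl inv.hsort j hj).2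
      exact ⟨hm.1, hm.2.1, by omega⟩
    · intro j hj1 hj2 hj3 hjn
      obtain ⟨i, hi, hlt, hle⟩ := inv.hcov j hj1 (by omega) hj3 hjn
      exact ⟨i, hi, hlt, hle⟩

-- members of B's window-slice max list are exactly the dp values of indices in [t+1, min(t+w, n-1)]
lemma pvSlice_mem (dp : List (Option Int)) (t w : Int) (_h0 : 0 ≤ t) (_hw : 1 ≤ w)
    (x : Int) :
    x ∈ (PySem.List.slice dp (some (t + 1)) (some (t + 1 + w))).map (fun o => o.getD 0) ↔
    ∃ j : Int, t + 1 ≤ j ∧ j ≤ t + w ∧ j.toNat < dp.length ∧ x = pvDAt dp j := by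
  rw [PySem.List.slice_toNat dp (by omega) (by omega)]
  set p := (t + 1).toNat with hp
  set q := (t + 1 + w).toNat - p with hq
  constructor
  · intro hx
    obtain ⟨k, hk, hko⟩ := List.mem_iff_getElem.mp hx
    have hkb : k < q ∧ k < dp.length - p := by
      simp only [List.length_map, List.length_take, List.length_drop] at hk
      omega
    rw [List.getElem_map, List.getElem_take, List.getElem_drop] at hko
    refine ⟨((p + k : Nat) : Int), by omega, by omega, by omega, ?_⟩
    unfold pvDAt
    have hnat : ((p + k : Nat) : Int).toNat = p + k := by omega
    rw [hnat, List.getD_eq_getElem?_getD,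
      List.getElem?_eq_getElem (show p + k < dp.length by omega)]
    simpa using hko.symm
  · rintro ⟨j, hj1, hj2, hj3, rfl⟩
    have hm : j.toNat = p + (j.toNat - p) := by omega
    refine List.mem_iff_getElem.mpr ⟨j.toNat - p, ?_, ?_⟩
    · simp only [List.length_map, List.length_take, List.length_drop]
      omega
    · rw [List.getElem_map, List.getElem_take, List.getElem_drop]
      unfold pvDAt
      have h4 : p + (j.toNat - p) < dp.length := by omega
      have e1 : dp[p + (j.toNat - p)]? = dp[j.toNat]? := by rw [← hm]
      have e2 : some (dp[p + (j.toNat - p)]'h4) = some (dp[j.toNat]'hj3) := by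
        rw [← List.getElem?_eq_getElem h4, ← List.getElem?_eq_getElem hj3, e1]
      rw [List.getD_eq_getElem?_getD, List.getElem?_eq_getElem hj3]
      simp [Option.some.inj e2]

-- the key step lemma: one iteration keeps the dp caches equal and re-establishes the invariant
lemma pvStep_main (nums : List Int) (w : Int) (hw : 1 ≤ w) (t : Int)
    (h0 : 0 ≤ t) (h2 : t ≤ (nums.length : Int) - 2)
    (dp : List (Option Int)) (W : List Int) (inv : pvInv nums w t dp W) :
    (pvStepA nums w (dp, W) t).1 = pvStepB nums w dp t ∧
    pvInv nums w (t - 1) (pvStepB nums w dp t) (pvStepA nums w (dp, W) t).2 := by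
  have hn2 : 2 ≤ nums.length := by omega
  obtain ⟨hne1, hlast1, hmem1, hsort1, hcov1⟩ := pvAfterPop nums w t dp W hw h0 h2 inv
  set W1 := if W.headD 0 - t > w then W.tail else W with hW1def
  obtain ⟨F1, tl1, hW1⟩ : ∃ F tl, W1 = F :: tl := by
    cases hW : W1 with
    | nil => exact absurd hW hne1
    | cons a l => exact ⟨a, l, rfl⟩
  have hF1mem : F1 ∈ W1 := by rw [hW1]; exact List.mem_cons_self
  have hF1 := hmem1 F1 hF1mem
  -- F1 dominates the whole window range
  have hdomF : ∀ j : Int, t + 1 ≤ j → j ≤ t + w → j ≤ (nums.length : Int) - 1 →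
      pvDAt dp j ≤ pvDAt dp F1 := by
    intro j hj1 hj2 hj3
    have hsort1' : (F1 :: tl1).Pairwise (fun x y => y < x ∧ pvDAt dp y < pvDAt dp x) :=
      hW1 ▸ hsort1
    by_cases hjW : j ∈ W1
    · exact (pvHead_dom dp F1 tl1 hsort1' j (hW1 ▸ hjW)).1
    · obtain ⟨i, hi, _, hle⟩ := hcov1 j hj1 hj2 hj3 hjW
      exact le_trans hle (pvHead_dom dp F1 tl1 hsort1' i (hW1 ▸ hi)).1
  -- B's max over the slice equals dp[F1]
  have hmax : (PySem.List.max?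
      ((PySem.List.slice dp (some (t + 1)) (some (t + 1 + w))).map (fun o => o.getD 0))
      (fun x => x)).getD 0 = pvDAt dp F1 := by
    set lB := (PySem.List.slice dp (some (t + 1)) (some (t + 1 + w))).map
      (fun o => o.getD 0) with hlB
    have hF1in : pvDAt dp F1 ∈ lB := by
      rw [hlB, pvSlice_mem dp t w h0 hw]
      exact ⟨F1, hF1.1, hF1.2.2, by have := hF1.2.1; have := inv.hlen; omega, rfl⟩
    obtain ⟨m, hm⟩ : ∃ m, PySem.List.max? lB (fun x => x) = some m := by
      cases hmm : PySem.List.max? lB (fun x => x) with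
      | none =>
        rw [PySem.List.max?_eq_none_iff] at hmm
        rw [hmm] at hF1in
        simp at hF1in
      | some m => exact ⟨m, rfl⟩
    have hmmem := PySem.List.max?_mem hm
    have hmmax := PySem.List.max?_isMax hm
    rw [hm]
    simp only [Option.getD_some]
    have h1 : m ≤ pvDAt dp F1 := by
      rw [hlB, pvSlice_mem dp t w h0 hw] at hmmem
      obtain ⟨j, hj1, hj2, hj3, rfl⟩ := hmmem
      exact hdomF j hj1 hj2 (by have := inv.hlen; omega)
    have h2' : pvDAt dp F1 ≤ m := hmmax _ hF1in
    omega
  -- the written value agrees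
  have hA1 : (pvStepA nums w (dp, W) t).1
      = dp.set t.toNat (some (pvDAt dp F1 + PySem.List.pyGetD nums t 0)) := by
    simp only [pvStepA, ← hW1def, hW1, List.headD_cons]
  have hB1 : pvStepB nums w dp t
      = dp.set t.toNat (some (pvDAt dp F1 + PySem.List.pyGetD nums t 0)) := by
    simp only [pvStepB, hmax]
    rw [Int.add_comm]
  set v := pvDAt dp F1 + PySem.List.pyGetD nums t 0 with hv
  set dp' := dp.set t.toNat (some v) with hdp'
  refine ⟨by rw [hA1, hB1], ?_⟩
  -- dp' reads
  have hd_eq : ∀ j : Int, t + 1 ≤ j → pvDAt dp' j = pvDAt dp j := by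
    intro j hj
    exact pvDAt_set_ne dp _ t j h0 (by omega) (by omega)
  have hd_t : pvDAt dp' t = v :=
    pvDAt_set_self dp v t h0 (by have := inv.hlen; omega)
  -- the second component of A's step
  have hA2 : (pvStepA nums w (dp, W) t).2 = pvPopLe dp' v W1 ++ [t] := by
    simp only [pvStepA, ← hW1def, hW1, List.headD_cons, ← hv, ← hdp']
  -- pop-from-back = takeWhile
  have hprop : W1.Pairwise (fun x y =>
      decide (pvDAt dp' x ≤ v) = true → decide (pvDAt dp' y ≤ v) = true) := by
    refine hsort1.imp_of_mem ?_
    intro a b ha hb hab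
    have hda := hd_eq a (hmem1 a ha).1
    have hdb := hd_eq b (hmem1 b hb).1
    simp only [decide_eq_true_eq] at *
    omega
  set W2 := W1.takeWhile (fun j => ! decide (pvDAt dp' j ≤ v)) with hW2
  have hpop : pvPopLe dp' v W1 = W2 := by
    unfold pvPopLe
    exact pvPop_takeWhile _ W1 hprop
  have hW2sub : W2.Sublist W1 := List.takeWhile_sublist _
  have hW2mem : ∀ j ∈ W2, j ∈ W1 := fun j hj => hW2sub.mem hj
  have hW2kept : ∀ j ∈ W2, v < pvDAt dp' j := by
    intro j hj
    have := List.mem_takeWhile_imp hj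
    simpa using this
  have hW2dropped : ∀ j ∈ W1, j ∉ W2 → pvDAt dp' j ≤ v := by
    intro j hj hnj
    have := pvPop_dropped _ W1 hprop j hj hnj
    simpa using this
  rw [hA2, hpop]
  -- re-establish the invariant at t-1
  refine ⟨?_, by simp, by simp, ?_, ?_, ?_⟩
  · -- length
    rw [hB1, List.length_set]
    exact inv.hlen
  · -- membership bounds
    intro j hj
    rcases List.mem_append.mp hj with hj2 | hj2
    · have hm := hmem1 j (hW2mem j hj2)
      exact ⟨by omega, hm.2.1, by omega⟩
    · have : j = t := by simpa using hj2
      subst this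
      exact ⟨by omega, by omega, by omega⟩
  · -- sortedness, with dp' values (agree with dp on W2 since those indices are ≥ t+1)
    rw [hB1, List.pairwise_append]
    refine ⟨?_, by simp, ?_⟩
    · have hs2 : W2.Pairwise (fun x y => y < x ∧ pvDAt dp y < pvDAt dp x) :=
        hsort1.sublist hW2sub
      refine hs2.imp_of_mem ?_
      intro a b ha hb hab
      rw [hd_eq a (hmem1 a (hW2mem a ha)).1, hd_eq b (hmem1 b (hW2mem b hb)).1]
      exact hab
    · intro x hx y hy
      have hyt : y = t := by simpa using hy
      subst hyt
      have h1 := (hmem1 x (hW2mem x hx)).1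
      have h2' := hW2kept x hx
      rw [hd_t]
      exact ⟨by omega, by omega⟩
  · -- coverage at t-1
    rw [hB1]
    intro j hj1 hj2 hj3 hjn
    have hjt : j ≠ t := by
      intro h
      subst h
      exact hjn (List.mem_append.mpr (Or.inr List.mem_cons_self))
    have hj1' : t + 1 ≤ j := by omega
    have hjw : j ≤ t + w := by omega
    have hdj : pvDAt dp' j = pvDAt dp j := hd_eq j hj1'
    by_cases hjW1 : j ∈ W1
    · -- dropped from the back by v: t itself is the dominator
      have hjW2 : j ∉ W2 := fun h => hjn (List.mem_append.mpr (Or.inl h))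
      have := hW2dropped j hjW1 hjW2
      exact ⟨t, List.mem_append.mpr (Or.inr List.mem_cons_self), by omega, by rw [hd_t]; omega⟩
    · obtain ⟨i, hi, hilt, hile⟩ := hcov1 j hj1' hjw hj3 hjW1
      by_cases hiW2 : i ∈ W2
      · refine ⟨i, List.mem_append.mpr (Or.inl hiW2), hilt, ?_⟩
        rw [hdj, hd_eq i (hmem1 i hi).1]
        exact hile
      · have hiv := hW2dropped i hi hiW2
        rw [hd_eq i (hmem1 i hi).1] at hiv
        exact ⟨t, List.mem_append.mpr (Or.inr List.mem_cons_self), by omega,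
          by rw [hd_t, hdj]; omega⟩

-- the whole loop keeps the two dp caches equal
lemma pvLoop (nums : List Int) (w : Int) (hw : 1 ≤ w) (_hn : 2 ≤ nums.length) :
    ∀ (k : Nat) (t : Int), t + 1 = (k : Int) → t ≤ (nums.length : Int) - 2 →
    ∀ (dp : List (Option Int)) (W : List Int), pvInv nums w t dp W →
    ((PySem.List.pyRange t (-1) (-1)).foldl (pvStepA nums w) (dp, W)).1
      = (PySem.List.pyRange t (-1) (-1)).foldl (pvStepB nums w) dp := by
  intro k
  induction k with
  | zero =>
    intro t ht _ dp W _
    have ht' : t = -1 := by omega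
    subst ht'
    rw [PySem.List.pyRange_neg_one_eq_nil (by omega)]
    rfl
  | succ k ih =>
    intro t ht h2 dp W inv
    have h0 : 0 ≤ t := by omega
    rw [PySem.List.pyRange_neg_one_cons (by omega)]
    simp only [List.foldl_cons]
    obtain ⟨heq, hinv'⟩ := pvStep_main nums w hw t h0 h2 dp W inv
    have hst : pvStepA nums w (dp, W) t
        = (pvStepB nums w dp t, (pvStepA nums w (dp, W) t).2) := by
      rw [← heq]
    rw [hst]
    exact ih (t - 1) (by omega) (by omega) _ _ hinv'

-- ===== VERDICT (by name: the statement is the Claim_ definition above) =====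
theorem find_max_score_spec : Claim_equal_find_max_score := by
  intro nums w _ hpre
  obtain ⟨hne, hcase⟩ := hpre
  unfold Spec_find_max_score find_max_score find_max_score_alt
  by_cases h1 : nums.length = 1
  · -- one element: the loop body never runs; both sides are the same expression
    rw [h1]
    norm_num
  · have hn : 2 ≤ nums.length := by
      have : nums.length ≠ 0 := fun h => hne (List.eq_nil_of_length_eq_zero h)
      omega
    have hw : 1 ≤ w := by tauto
    set dp0 := (List.replicate nums.length (none : Option Int)).set
      (nums.length - 1) (PySem.List.pyGet? nums (-1)) with hdp0
    have hinv0 : pvInv nums w ((nums.length : Int) - 2) dp0 [(nums.length : Int) - 1] := by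
      refine ⟨by simp [hdp0], by simp, by simp; omega, ?_, by simp, ?_⟩
      · intro j hj
        have : j = (nums.length : Int) - 1 := by simpa using hj
        subst this
        refine ⟨by omega, by omega, by omega⟩
      · intro j hj1 hj2 hj3 hjn
        have : j = (nums.length : Int) - 1 := by omega
        subst this
        simp at hjn
    have hk : ((nums.length : Int) - 2) + 1 = ((nums.length - 1 : Nat) : Int) := by
      omega
    have heq := pvLoop nums w hw hn (nums.length - 1) ((nums.length : Int) - 2)
      hk (by omega) dp0 [(nums.length : Int) - 1] hinv0
    show pvDAt ((PySem.List.pyRange ((nums.length : Int) - 2) (-1) (-1)).foldl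
        (pvStepA nums w) (dp0, [(nums.length : Int) - 1])).1 0
      = pvDAt ((PySem.List.pyRange ((nums.length : Int) - 2) (-1) (-1)).foldl
        (pvStepB nums w) dp0) 0
    rw [heq]
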